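-- pv_equiv track=rewrite | github.com/irvinodjuana/acm | archive/practice/2020.05.10/phoenix_and_science.py | find
-- ===== SOURCE A (Python) =====
-- def find(mass, num, goal, path):
--     if mass > goal:
--         return False, None
--     if mass == goal:
--         return True, path
--
--     for split in range(num, -1, -1):
--         found, soln = find(mass + num + split, num + split, goal, path + [split])
--         if found:
--             return True, soln
--
--     return False, None
-- ===== SOURCE B (Python) =====
-- def find(mass, num, goal, path):
--     # Greedy closed form instead of backtracking DFS: from a state (m, n) with
--     # n >= 1 the goal is reachable iff m == goal or m + n <= goal, so at each
--     # step we pick the largest split whose child state stays solvable and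
--     # never backtrack.
--     m, n = mass, num
--     if m > goal:
--         return False, None
--     suffix = []
--     while m != goal:
--         if n < 1 or m + n > goal:
--             return False, None
--         # largest s in [0, n] whose child (m+n+s, n+s) is solvable, i.e.
--         # m+n+s == goal (exact hit) or (m+n+s) + (n+s) <= goal
--         s_hit = goal - m - n            # exact hit (always >= 0 here)
--         s_low = (goal - m - 2 * n) // 2  # solvable-child cap
--         s = s_hit if s_hit <= n else -1
--         if s_low >= 0:
--             s = max(s, min(n, s_low))
--         suffix.append(s)
--         m, n = m + n + s, n + s
--     return True, path + suffix
-- ===== Notes on version B (the rewrite author's own statement) =====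
-- stated objective: alternative
-- what changed: B replaces A's backtracking DFS over split sequences by a single greedy loop that, using the closed-form reachability fact 'a state (m,n) with n>=1 can reach goal iff m==goal or m+n<=goal', directly picks the largest viable split at each step and never backtracks.
import Mathlib
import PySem

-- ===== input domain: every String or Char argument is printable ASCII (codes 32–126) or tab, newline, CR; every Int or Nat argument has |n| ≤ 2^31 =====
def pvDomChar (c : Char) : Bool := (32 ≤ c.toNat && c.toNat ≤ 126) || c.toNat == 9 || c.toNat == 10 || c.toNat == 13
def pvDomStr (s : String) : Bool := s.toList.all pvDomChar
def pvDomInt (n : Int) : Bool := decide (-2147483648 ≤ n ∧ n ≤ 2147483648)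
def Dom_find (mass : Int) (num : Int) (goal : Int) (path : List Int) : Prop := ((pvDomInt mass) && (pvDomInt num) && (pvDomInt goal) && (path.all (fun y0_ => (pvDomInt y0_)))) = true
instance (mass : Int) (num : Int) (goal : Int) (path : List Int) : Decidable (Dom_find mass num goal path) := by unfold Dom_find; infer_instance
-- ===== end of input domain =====

-- B replaces A's backtracking DFS by a greedy loop based on a closed-form
-- reachability criterion for a state (m, n); objective: alternative algorithm.

-- ===== PORT A =====
-- Python A recurses; we port it with a fuel parameter.  Each recursive call
-- strictly increases mass (on inputs where A terminates), so fuel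
-- (goal - mass).toNat + 1 makes the port compute exactly A's value on Pre_.

-- the 'for split in range(num, -1, -1): … if found: return' loop of A
def findLoop (F : Int → Int → Int → List Int → Bool × Option (List Int))
    (mass num goal : Int) (path : List Int) : List Int → Bool × Option (List Int)
  | [] => (false, none)
  | s :: rest =>
      let r := F (mass + num + s) (num + s) goal (path ++ [s])
      if r.1 then (true, r.2) else findLoop F mass num goal path rest

def findF : Nat → Int → Int → Int → List Int → Bool × Option (List Int)
  | 0, _, _, _, _ => (false, none)
  | fuel + 1, mass, num, goal, path =>
      if mass > goal then (false, none)
      else if mass = goal then (true, some path)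
      else findLoop (findF fuel) mass num goal path (PySem.List.pyRange num (-1) (-1))

def find (mass : Int) (num : Int) (goal : Int) (path : List Int) : Bool × Option (List Int) :=
  findF ((goal - mass).toNat + 1) mass num goal path

-- ===== PORT B =====
-- largest s in [0, n] whose child state (m+n+s, n+s) can still reach goal
def pickSplit (m n goal : Int) : Int :=
  let sHit := goal - m - n
  let sLow := PySem.Int.floordiv (goal - m - 2 * n) 2
  let s0 := if sHit ≤ n then sHit else -1
  if 0 ≤ sLow then max s0 (min n sLow) else s0

-- the 'while m != goal' loop of B, accumulating the suffix of splits; fuel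
-- (goal - m).toNat + 1 always suffices because each iteration strictly
-- increases m while m stays ≤ goal
def altLoop : Nat → Int → Int → Int → List Int → Bool × Option (List Int)
  | 0, _, _, _, _ => (false, none)
  | fuel + 1, m, n, goal, out =>
      if m = goal then (true, some out)
      else if n < 1 ∨ m + n > goal then (false, none)
      else
        let s := pickSplit m n goal
        altLoop fuel (m + n + s) (n + s) goal (out ++ [s])

def find_alt (mass : Int) (num : Int) (goal : Int) (path : List Int) : Bool × Option (List Int) :=
  if mass > goal then (false, none)
  else
    let r := altLoop ((goal - mass).toNat + 1) mass num goal []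
    if r.1 then (true, r.2.map (fun suf => path ++ suf)) else (false, none)

-- ===== PRECONDITION & SPEC =====
-- Pre_ excludes exactly the inputs with num = 0 and mass < goal, on which the
-- Python A recurses forever (the split 0 child repeats the same state).
def Pre_find (mass : Int) (num : Int) (goal : Int) (_path : List Int) : Prop :=
  ¬ (num = 0 ∧ mass < goal)
instance (mass : Int) (num : Int) (goal : Int) (path : List Int) : Decidable (Pre_find mass num goal path) := by unfold Pre_find; infer_instance

def pvWitness_find : Int × Int × Int × List Int := (0, 1, 5, [])

def Spec_find (mass : Int) (num : Int) (goal : Int) (path : List Int) (out : Bool × Option (List Int)) : Prop := out = find_alt mass num goal path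
instance (mass : Int) (num : Int) (goal : Int) (path : List Int) (out : Bool × Option (List Int)) : Decidable (Spec_find mass num goal path out) := by unfold Spec_find; infer_instance

-- ===== CLAIM (what is proved, stated in full; the proofs are below) =====
def Claim_equal_find : Prop := ∀ (mass : Int) (num : Int) (goal : Int) (path : List Int), Dom_find mass num goal path → Pre_find mass num goal path → Spec_find mass num goal path (find mass num goal path)

-- ===== LEMMAS AND PROOFS =====

-- 'solvable' states: those from which A's search succeeds (for n ≥ 1)
def Solv (m n goal : Int) : Prop := m = goal ∨ (1 ≤ n ∧ m + n ≤ goal)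

theorem pickSplit_bounds (m n goal : Int) (hn : 1 ≤ n) (hm : m + n ≤ goal) (_hne : m ≠ goal) :
    0 ≤ pickSplit m n goal ∧ pickSplit m n goal ≤ n := by
  have hfd := PySem.Int.floordiv_eq_ediv_of_pos (a := goal - m - 2 * n) (b := 2) (by norm_num)
  simp only [pickSplit, hfd]
  split_ifs <;> omega

theorem pickSplit_solv (m n goal : Int) (hn : 1 ≤ n) (hm : m + n ≤ goal) (_hne : m ≠ goal) :
    Solv (m + n + pickSplit m n goal) (n + pickSplit m n goal) goal := by
  have hfd := PySem.Int.floordiv_eq_ediv_of_pos (a := goal - m - 2 * n) (b := 2) (by norm_num)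
  unfold Solv
  simp only [pickSplit, hfd]
  split_ifs <;> omega

theorem pickSplit_max (m n goal : Int) (hn : 1 ≤ n) (hm : m + n ≤ goal) (_hne : m ≠ goal)
    (s : Int) (hgt : pickSplit m n goal < s) (hle : s ≤ n) :
    ¬ Solv (m + n + s) (n + s) goal := by
  have hfd := PySem.Int.floordiv_eq_ediv_of_pos (a := goal - m - 2 * n) (b := 2) (by norm_num)
  unfold Solv
  simp only [pickSplit, hfd] at hgt
  split_ifs at hgt <;> omega

-- B's loop succeeds on every solvable state with enough fuel
theorem altLoop_solv : ∀ (f : Nat) (m n goal : Int) (out : List Int),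
    (goal - m).toNat < f → Solv m n goal → (altLoop f m n goal out).1 = true := by
  intro f
  induction f with
  | zero => intro m n goal out hf _; omega
  | succ f ih =>
    intro m n goal out hf hs
    by_cases hmg : m = goal
    · simp [altLoop, hmg]
    · rcases hs with hmg' | ⟨hn, hm⟩
      · exact absurd hmg' hmg
      have hng : ¬ (n < 1 ∨ m + n > goal) := by omega
      have hb := pickSplit_bounds m n goal hn hm hmg
      have hsv := pickSplit_solv m n goal hn hm hmg
      simp only [altLoop, if_neg hmg, if_neg hng]
      exact ih _ _ _ _ (by omega) hsv

-- A's search fails outright whenever mass > goal, at any fuel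
theorem findF_gt (f : Nat) (m n goal : Int) (p : List Int) (h : m > goal) :
    (findF f m n goal p).1 = false := by
  cases f with
  | zero => simp [findF]
  | succ f => simp [findF, if_pos h]

-- A's loop returns (false, none) when every child call fails
theorem findLoop_all_false (F : Int → Int → Int → List Int → Bool × Option (List Int))
    (m n goal : Int) (p : List Int) : ∀ (l : List Int),
    (∀ s ∈ l, (F (m + n + s) (n + s) goal (p ++ [s])).1 = false) →
    findLoop F m n goal p l = (false, none) := by
  intro l
  induction l with
  | nil => intro _; rfl
  | cons s rest ih =>
    intro h
    have hs := h s (by simp)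
    simp only [findLoop, hs]
    simp only [Bool.false_eq_true, if_false]
    exact ih (fun t ht => h t (by simp [ht]))

-- A's descending loop skips the failing splits above s* and stops at s*
theorem findLoop_skip (F : Int → Int → Int → List Int → Bool × Option (List Int))
    (m n goal : Int) (p : List Int) (s' : Int) (hs' : 0 ≤ s')
    (hsucc : (F (m + n + s') (n + s') goal (p ++ [s'])).1 = true) :
    ∀ (d : Nat) (k : Int), k = s' + d →
    (∀ s, s' < s → s ≤ k → (F (m + n + s) (n + s) goal (p ++ [s])).1 = false) →
    findLoop F m n goal p (PySem.List.pyRange k (-1) (-1)) =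
      (true, (F (m + n + s') (n + s') goal (p ++ [s'])).2) := by
  intro d
  induction d with
  | zero =>
    intro k hk _
    subst hk
    rw [PySem.List.pyRange_neg_one_cons (by omega)]
    simp only [findLoop]
    simp [hsucc]
  | succ d ih =>
    intro k hk hfail
    rw [PySem.List.pyRange_neg_one_cons (by omega)]
    simp only [findLoop]
    rw [hfail k (by omega) (by omega)]
    simp only [Bool.false_eq_true, if_false]
    exact ih (k - 1) (by omega) (fun s h1 h2 => hfail s h1 (by omega))

-- main equivalence: with n ≥ 1 and enough fuel, the two ports agree step by step
theorem findF_eq_altLoop : ∀ (f : Nat) (m n goal : Int) (p : List Int),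
    1 ≤ n → (goal - m).toNat < f → findF f m n goal p = altLoop f m n goal p := by
  intro f
  induction f with
  | zero => intro m n goal p _ hf; omega
  | succ f ih =>
    intro m n goal p hn hf
    by_cases hgt : m > goal
    · have hmg : m ≠ goal := by omega
      have hng : n < 1 ∨ m + n > goal := by omega
      simp [findF, altLoop, if_pos hgt, if_neg hmg, if_pos hng]
    by_cases hmg : m = goal
    · simp [findF, altLoop, if_neg hgt, if_pos hmg]
    -- m < goal
    have hmlt : m < goal := by omega
    simp only [findF, if_neg hgt, if_neg hmg]
    by_cases hbig : m + n > goal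
    · -- no viable child: both fail
      have hng : n < 1 ∨ m + n > goal := by omega
      rw [findLoop_all_false]
      · simp [altLoop, if_neg hmg, if_pos hng]
      · intro s hs
        rw [PySem.List.mem_pyRange_neg_one] at hs
        exact findF_gt f _ _ _ _ (by omega)
    · -- viable state: A's loop stops exactly at B's pickSplit
      have hm : m + n ≤ goal := by omega
      have hng : ¬ (n < 1 ∨ m + n > goal) := by omega
      have hb := pickSplit_bounds m n goal hn hm hmg
      have hsv := pickSplit_solv m n goal hn hm hmg
      set s' := pickSplit m n goal with hs'def
      have hfuel1 : 1 ≤ (goal - m).toNat := by omega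
      have hchildfuel : ∀ s : Int, 0 ≤ s → (goal - (m + n + s)).toNat < f := by
        intro s hs; omega
      have hchild : findF f (m + n + s') (n + s') goal (p ++ [s']) =
          altLoop f (m + n + s') (n + s') goal (p ++ [s']) :=
        ih _ _ _ _ (by omega) (hchildfuel s' hb.1)
      have hsucc : (findF f (m + n + s') (n + s') goal (p ++ [s'])).1 = true := by
        rw [hchild]
        exact altLoop_solv f _ _ _ _ (hchildfuel s' hb.1) hsv
      have hfail : ∀ s, s' < s → s ≤ n →
          (findF f (m + n + s) (n + s) goal (p ++ [s])).1 = false := by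
        intro s h1 h2
        have hns : 1 ≤ n + s := by omega
        rw [ih _ _ _ _ hns (hchildfuel s (by omega))]
        have hnsolv := pickSplit_max m n goal hn hm hmg s h1 h2
        unfold Solv at hnsolv
        rw [not_or] at hnsolv
        obtain ⟨hq1, hq2⟩ := hnsolv
        rw [not_and_or] at hq2
        cases f with
        | zero => omega
        | succ f' =>
          have : (m + n + s) ≠ goal := hq1
          have hng2 : (n + s) < 1 ∨ (m + n + s) + (n + s) > goal := by omega
          simp [altLoop, if_neg this, if_pos hng2]
      rw [findLoop_skip (findF f) m n goal p s' hb.1 hsucc (n - s').toNat n (by omega) hfail]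
      simp only [altLoop, if_neg hmg, if_neg hng]
      rw [← hs'def, hchild]
      have h1 := altLoop_solv f (m + n + s') (n + s') goal (p ++ [s']) (hchildfuel s' hb.1) hsv
      rw [← h1]

-- the accumulator of B's loop is only ever appended to
theorem altLoop_shift : ∀ (f : Nat) (m n goal : Int) (a out : List Int),
    altLoop f m n goal (a ++ out) =
      ((altLoop f m n goal out).1, (altLoop f m n goal out).2.map (fun suf => a ++ suf)) := by
  intro f
  induction f with
  | zero => intro m n goal a out; rfl
  | succ f ih =>
    intro m n goal a out
    by_cases hmg : m = goal
    · simp [altLoop, hmg]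
    by_cases hng : n < 1 ∨ m + n > goal
    · simp [altLoop, hmg, hng]
    · simp only [altLoop, if_neg hmg, if_neg hng]
      rw [show (a ++ out) ++ [pickSplit m n goal] = a ++ (out ++ [pickSplit m n goal]) from
        (List.append_assoc a out _)]
      exact ih _ _ _ a (out ++ [pickSplit m n goal])

-- B's loop returns (false, none) whenever its flag is false
theorem altLoop_false : ∀ (f : Nat) (m n goal : Int) (out : List Int),
    (altLoop f m n goal out).1 = false → altLoop f m n goal out = (false, none) := by
  intro f
  induction f with
  | zero => intro _ _ _ _ _; rfl
  | succ f ih =>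
    intro m n goal out h
    by_cases hmg : m = goal
    · simp [altLoop, hmg] at h
    by_cases hng : n < 1 ∨ m + n > goal
    · simp [altLoop, hmg, hng]
    · simp only [altLoop, if_neg hmg, if_neg hng] at h ⊢
      exact ih _ _ _ _ h

-- assemble: find equals B's loop started on the empty suffix with path prepended
theorem find_eq_assemble (mass num goal : Int) (path : List Int)
    (h : find mass num goal path = altLoop ((goal - mass).toNat + 1) mass num goal path)
    (hgt : ¬ mass > goal) :
    find mass num goal path = find_alt mass num goal path := by
  unfold find_alt
  rw [if_neg hgt]
  have hshift := altLoop_shift ((goal - mass).toNat + 1) mass num goal path []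
  rw [List.append_nil] at hshift
  rw [h, hshift]
  cases hflag : (altLoop ((goal - mass).toNat + 1) mass num goal []).1 with
  | false =>
    rw [altLoop_false _ _ _ _ _ hflag]
    simp
  | true =>
    simp [hflag]

-- ===== VERDICT (by name: the statement is the Claim_ definition above) =====
theorem find_spec : Claim_equal_find := by
  intro mass num goal path _ hpre
  unfold Spec_find
  by_cases hgt : mass > goal
  · unfold find find_alt
    simp [findF, if_pos hgt]
  refine find_eq_assemble mass num goal path ?_ hgt
  unfold find
  by_cases hn : 1 ≤ num
  · exact findF_eq_altLoop _ _ _ _ _ hn (by omega)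
  by_cases hmg : mass = goal
  · simp [findF, altLoop, if_neg hgt, if_pos hmg]
  · -- mass < goal, num < 1; Pre_ gives num ≠ 0, so num ≤ -1 and A's range is empty
    have hneg : num ≤ -1 := by
      unfold Pre_find at hpre
      omega
    simp only [findF, if_neg hgt, if_neg hmg]
    rw [PySem.List.pyRange_neg_one_eq_nil (by omega)]
    have hng : num < 1 ∨ mass + num > goal := by omega
    simp [findLoop, altLoop, if_neg hmg, if_pos hng]
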